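-- pv_equiv track=rewrite | github.com/johnwsampson/single-file-bench | scripts/sft_track.py | _generate_kanban_html
-- ===== SOURCE A (Python) =====
-- def _html_esc(s: str) -> str:
--     """Escape HTML special characters."""
--     return (
--         str(s)
--         .replace("&", "&amp;")
--         .replace("<", "&lt;")
--         .replace(">", "&gt;")
--         .replace('"', "&quot;")
--     )
--
-- def _generate_kanban_html(tasks: list[dict]) -> str:
--     """Generate kanban board HTML."""
--     columns: dict[str, list[dict]] = {
--         "pending": [],
--         "active": [],
--         "waiting": [],
--         "done": [],
--         "dropped": [],
--     }
--     for task in tasks: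
--         s = task.get("status", "pending")
--         if s in columns:
--             columns[s].append(task)
--
--     parts = ['<div class="kanban">']
--     for status, col_tasks in columns.items():
--         if not col_tasks and status == "dropped":
--             continue  # hide empty dropped column
--         parts.append(
--             f'<div class="kanban-column"><h3>{_html_esc(status.upper())} ({len(col_tasks)})</h3>'
--         )
--         for t in col_tasks:
--             p = t.get("priority", "medium")
--             tid = t.get("id", "?")
--             parts.append(f'<div class="kanban-card priority-{_html_esc(p)}">')
--             parts.append(f'<div class="id">{_html_esc(tid)}</div>')
--             parts.append(
--                 f'<div class="content">{_html_esc(t.get("content", "")[:120])}</div>'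
--             )
--             tags = t.get("tags", "")
--             if tags:
--                 parts.append(f'<div class="meta">{_html_esc(tags)}</div>')
--             parts.append("</div>")
--         parts.append("</div>")
--     parts.append("</div>")
--     return "\n".join(parts)
-- ===== SOURCE B (Python) =====
-- _STATUSES = ["pending", "active", "waiting", "done", "dropped"]
--
--
-- def _html_esc(s: str) -> str:
--     """Escape HTML special characters."""
--     return (
--         str(s)
--         .replace("&", "&amp;")
--         .replace("<", "&lt;")
--         .replace(">", "&gt;")
--         .replace('"', "&quot;")
--     )
--
--
-- def _card_lines(t: dict) -> list:
--     p = t.get("priority", "medium")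
--     lines = [
--         f'<div class="kanban-card priority-{_html_esc(p)}">',
--         f'<div class="id">{_html_esc(t.get("id", "?"))}</div>',
--         f'<div class="content">{_html_esc(t.get("content", "")[:120])}</div>',
--     ]
--     tags = t.get("tags", "")
--     if tags:
--         lines.append(f'<div class="meta">{_html_esc(tags)}</div>')
--     lines.append("</div>")
--     return lines
--
--
-- def _generate_kanban_html(tasks: list) -> str:
--     """Generate kanban board HTML (no bucketing dict: one filter pass per fixed column)."""
--     parts = ['<div class="kanban">']
--     for status in _STATUSES:
--         col = [t for t in tasks if t.get("status", "pending") == status]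
--         if status == "dropped" and not col:
--             continue
--         parts.append(
--             f'<div class="kanban-column"><h3>{_html_esc(status.upper())} ({len(col)})</h3>'
--         )
--         for t in col:
--             parts.extend(_card_lines(t))
--         parts.append("</div>")
--     parts.append("</div>")
--     return "\n".join(parts)
-- ===== Notes on version B (the rewrite author's own statement) =====
-- stated objective: simpler
-- what changed: Drops the columns bucketing dict entirely: B loops over the fixed status list and filters the task list per column in original order, rendering directly, instead of A's bucket-into-dict pass followed by iterating dict items.
import Mathlib
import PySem

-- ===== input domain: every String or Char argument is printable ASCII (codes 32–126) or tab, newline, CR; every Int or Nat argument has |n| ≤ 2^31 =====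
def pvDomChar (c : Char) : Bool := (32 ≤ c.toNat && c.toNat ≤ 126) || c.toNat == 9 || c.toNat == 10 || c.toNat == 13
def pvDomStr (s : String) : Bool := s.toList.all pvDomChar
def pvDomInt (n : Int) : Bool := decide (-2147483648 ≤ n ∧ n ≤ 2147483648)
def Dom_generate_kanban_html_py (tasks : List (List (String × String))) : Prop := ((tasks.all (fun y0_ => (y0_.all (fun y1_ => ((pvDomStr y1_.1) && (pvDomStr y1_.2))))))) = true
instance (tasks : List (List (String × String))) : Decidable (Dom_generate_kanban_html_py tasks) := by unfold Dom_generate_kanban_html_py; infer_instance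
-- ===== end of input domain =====

-- B changes: no bucketing dict — it loops over the fixed status list and filters tasks per column (objective: simpler).

-- shared module helper _html_esc (both Pythons use the same function)
def htmlEsc (s : String) : String :=
  PySem.Str.replace (PySem.Str.replace (PySem.Str.replace (PySem.Str.replace s "&" "&amp;") "<" "&lt;") ">" "&gt;") "\"" "&quot;"

-- task.get(k, d) on a task dict (assoc list, first match)
def taskGetD (t : List (String × String)) (k d : String) : String :=
  match t.find? (fun p => p.1 == k) with
  | some p => p.2
  | none => d

-- ===== PORT A =====
def generate_kanban_html_py (tasks : List (List (String × String))) : String :=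
  let columns : PySem.Dict String (List (List (String × String))) :=
    PySem.Dict.ofList [("pending", []), ("active", []), ("waiting", []), ("done", []), ("dropped", [])]
  let columns := tasks.foldl (fun cols task =>
    let s := taskGetD task "status" "pending"
    if cols.contains s then cols.modify s [] (fun l => l ++ [task]) else cols) columns
  let parts := ["<div class=\"kanban\">"]
  let parts := columns.items.foldl (fun parts sc =>
    let status := sc.1
    let col_tasks := sc.2
    if col_tasks.isEmpty && status == "dropped" then parts
    else
      let parts := parts ++ ["<div class=\"kanban-column\"><h3>" ++ htmlEsc (PySem.Str.upper status) ++ " (" ++ PySem.Int.toStr (col_tasks.length : Int) ++ ")</h3>"]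
      let parts := col_tasks.foldl (fun parts t =>
        let p := taskGetD t "priority" "medium"
        let tid := taskGetD t "id" "?"
        let parts := parts ++ ["<div class=\"kanban-card priority-" ++ htmlEsc p ++ "\">"]
        let parts := parts ++ ["<div class=\"id\">" ++ htmlEsc tid ++ "</div>"]
        let parts := parts ++ ["<div class=\"content\">" ++ htmlEsc (PySem.Str.slice (taskGetD t "content" "") none (some 120)) ++ "</div>"]
        let tags := taskGetD t "tags" ""
        let parts := if tags ≠ "" then parts ++ ["<div class=\"meta\">" ++ htmlEsc tags ++ "</div>"] else parts
        parts ++ ["</div>"]) parts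
      parts ++ ["</div>"]) parts
  let parts := parts ++ ["</div>"]
  PySem.Str.join "\n" parts

-- ===== PORT B =====
def pvStatuses : List String := ["pending", "active", "waiting", "done", "dropped"]

def cardLines (t : List (String × String)) : List String :=
  let p := taskGetD t "priority" "medium"
  let lines := ["<div class=\"kanban-card priority-" ++ htmlEsc p ++ "\">",
                "<div class=\"id\">" ++ htmlEsc (taskGetD t "id" "?") ++ "</div>",
                "<div class=\"content\">" ++ htmlEsc (PySem.Str.slice (taskGetD t "content" "") none (some 120)) ++ "</div>"]
  let tags := taskGetD t "tags" ""
  let lines := if tags ≠ "" then lines ++ ["<div class=\"meta\">" ++ htmlEsc tags ++ "</div>"] else lines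
  lines ++ ["</div>"]

def generate_kanban_html_py_alt (tasks : List (List (String × String))) : String :=
  let parts := ["<div class=\"kanban\">"]
  let parts := pvStatuses.foldl (fun parts status =>
    let col := tasks.filter (fun t => taskGetD t "status" "pending" == status)
    if status == "dropped" && col.isEmpty then parts
    else
      let parts := parts ++ ["<div class=\"kanban-column\"><h3>" ++ htmlEsc (PySem.Str.upper status) ++ " (" ++ PySem.Int.toStr (col.length : Int) ++ ")</h3>"]
      let parts := col.foldl (fun parts t => parts ++ cardLines t) parts
      parts ++ ["</div>"]) parts
  let parts := parts ++ ["</div>"]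
  PySem.Str.join "\n" parts

-- ===== PRECONDITION & SPEC =====
def Spec_generate_kanban_html_py (tasks : List (List (String × String))) (out : String) : Prop := out = generate_kanban_html_py_alt tasks
instance (tasks : List (List (String × String))) (out : String) : Decidable (Spec_generate_kanban_html_py tasks out) := by unfold Spec_generate_kanban_html_py; infer_instance

-- ===== CLAIM (what is proved, stated in full; the proofs are below) =====
def Claim_equal_generate_kanban_html_py : Prop := ∀ (tasks : List (List (String × String))), Dom_generate_kanban_html_py tasks → Spec_generate_kanban_html_py tasks (generate_kanban_html_py tasks)

-- ===== LEMMAS AND PROOFS =====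

-- abbreviations for the proofs
def pvSt (t : List (String × String)) : String := taskGetD t "status" "pending"

def pvStep (cols : PySem.Dict String (List (List (String × String)))) (task : List (String × String)) :
    PySem.Dict String (List (List (String × String))) :=
  if cols.contains (pvSt task) then cols.modify (pvSt task) [] (fun l => l ++ [task]) else cols

lemma keys_pvStep_fold (ts : List (List (String × String)))
    (d : PySem.Dict String (List (List (String × String)))) :
    (ts.foldl pvStep d).keys = d.keys := by
  induction ts generalizing d with
  | nil => rfl
  | cons t ts ih =>
      simp only [List.foldl_cons, ih]
      unfold pvStep
      split_ifs <;> simp [PySem.Dict.keys_modify, PySem.Dict.keys_insert_of_contains, *]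

lemma getD_pvStep_fold (ts : List (List (String × String)))
    (d : PySem.Dict String (List (List (String × String)))) (c : String)
    (hc : d.contains c = true) :
    (ts.foldl pvStep d).getD c [] = d.getD c [] ++ ts.filter (fun t => pvSt t == c) := by
  induction ts generalizing d with
  | nil => simp
  | cons t ts ih =>
      simp only [List.foldl_cons, List.filter_cons]
      by_cases hmem : d.contains (pvSt t) = true
      · have hstep : pvStep d t = d.modify (pvSt t) [] (fun l => l ++ [t]) := by
          unfold pvStep; rw [if_pos hmem]
        rw [hstep, ih _ (by simp [PySem.Dict.contains_modify, hc])]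
        rw [PySem.Dict.getD_modify]
        by_cases hce : c = pvSt t
        · simp [hce, List.append_assoc]
        · have : (pvSt t == c) = false := by simp [Ne.symm hce]
          simp [hce, this]
      · have hstep : pvStep d t = d := by unfold pvStep; rw [if_neg hmem]
        rw [hstep, ih _ hc]
        have hne : pvSt t ≠ c := fun h => hmem (h ▸ hc)
        simp [hne]

def pvInit : PySem.Dict String (List (List (String × String))) :=
  PySem.Dict.ofList [("pending", []), ("active", []), ("waiting", []), ("done", []), ("dropped", [])]

lemma items_bucket (ts : List (List (String × String))) :
    (ts.foldl pvStep pvInit).items =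
      pvStatuses.map (fun c => (c, ts.filter (fun t => pvSt t == c))) := by
  have hkeys : (ts.foldl pvStep pvInit).keys = pvStatuses := by
    rw [keys_pvStep_fold]; decide
  have hnd : (ts.foldl pvStep pvInit).keys.Nodup := by rw [hkeys]; decide
  rw [PySem.Dict.items_eq_map_keys _ hnd [], hkeys]
  refine List.map_congr_left (fun c hc => ?_)
  have hcin : pvInit.contains c = true := by
    fin_cases hc <;> decide
  rw [getD_pvStep_fold _ _ _ hcin]
  have h0 : pvInit.getD c [] = [] := by fin_cases hc <;> decide
  rw [h0, List.nil_append]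

-- A's inner card loop step equals appending B's cardLines
lemma card_step (parts : List String) (t : List (String × String)) :
    (let p := taskGetD t "priority" "medium"
     let tid := taskGetD t "id" "?"
     let parts := parts ++ ["<div class=\"kanban-card priority-" ++ htmlEsc p ++ "\">"]
     let parts := parts ++ ["<div class=\"id\">" ++ htmlEsc tid ++ "</div>"]
     let parts := parts ++ ["<div class=\"content\">" ++ htmlEsc (PySem.Str.slice (taskGetD t "content" "") none (some 120)) ++ "</div>"]
     let tags := taskGetD t "tags" ""
     let parts := if tags ≠ "" then parts ++ ["<div class=\"meta\">" ++ htmlEsc tags ++ "</div>"] else parts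
     parts ++ ["</div>"]) = parts ++ cardLines t := by
  dsimp only [cardLines]
  split_ifs <;> simp

lemma column_fold_eq (col : List (List (String × String))) (parts : List String) :
    col.foldl (fun parts t =>
        let p := taskGetD t "priority" "medium"
        let tid := taskGetD t "id" "?"
        let parts := parts ++ ["<div class=\"kanban-card priority-" ++ htmlEsc p ++ "\">"]
        let parts := parts ++ ["<div class=\"id\">" ++ htmlEsc tid ++ "</div>"]
        let parts := parts ++ ["<div class=\"content\">" ++ htmlEsc (PySem.Str.slice (taskGetD t "content" "") none (some 120)) ++ "</div>"]
        let tags := taskGetD t "tags" ""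
        let parts := if tags ≠ "" then parts ++ ["<div class=\"meta\">" ++ htmlEsc tags ++ "</div>"] else parts
        parts ++ ["</div>"]) parts
      = col.foldl (fun parts t => parts ++ cardLines t) parts := by
  induction col generalizing parts with
  | nil => rfl
  | cons t ts ih =>
      simp only [List.foldl_cons, card_step]

-- ===== VERDICT (by name: the statement is the Claim_ definition above) =====
theorem generate_kanban_html_py_spec : Claim_equal_generate_kanban_html_py := by
  intro tasks _
  unfold Spec_generate_kanban_html_py generate_kanban_html_py generate_kanban_html_py_alt
  have hfold : tasks.foldl (fun cols task =>
      let s := taskGetD task "status" "pending"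
      if cols.contains s then cols.modify s [] (fun l => l ++ [task]) else cols)
      (PySem.Dict.ofList [("pending", []), ("active", []), ("waiting", []), ("done", []), ("dropped", [])])
      = tasks.foldl pvStep pvInit := rfl
  simp only [hfold]
  rw [items_bucket]
  simp only [pvStatuses, List.map_cons, List.map_nil, List.foldl_cons, List.foldl_nil]
  congr 1
  simp only [column_fold_eq, pvSt]
  have hguard : ∀ (s : String) (col : List (List (String × String))),
      (col.isEmpty && (s == "dropped")) = ((s == "dropped") && col.isEmpty) := by
    intro s col; exact Bool.and_comm _ _
  simp only [hguard]
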